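-- pv_equiv track=rewrite | github.com/bxt/Ludus | unilectures.py/src/bxt/unilectures/theoinf/hausaufg02/aufg3.py | ListGetElement
-- ===== SOURCE A (Python) =====
-- def divtwo(x):
--     y=0
--     d=2
--     while (d<=x):
--         y=(y+1)
--         d=((y+y)+2)
--     return y
--
-- def ListGetLength(l):
--     c=-1 # counter fuer 10er
--     while(l>0):
--         quater=divtwo(divtwo(l)) # Division durch 4
--         rest=(l-((quater+quater)+(quater+quater))) # mod 4
--         if(rest == 2): # Rest == 2 <=> 10 am Ende
--             c=(c+1) # Folglich diese 10 zaehlen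
--         l=quater # Fuer naechsten Durchlauf
--     return c
--
-- def ListGetElement(l,i):
--     len=(ListGetLength(l)+1)
--     c=0 # counter fuer 10er
--     lese=0 # >0 Wenn im Lesemodus
--     ergebins=0
--     cpow2=1 # aktuelle Zweierpotenz zum auslesen
--     while(l>0):
--         half=divtwo(l)
--         quater=divtwo(half) # Division durch 4
--         rest=(l-((quater+quater)+(quater+quater))) # % 4
--         if(rest == 2): # Rest == 2 <=> 10 am Ende
--             c=(c+1) # Folglich diese 10 zaehlen
--             if(lese>0): # Beim Lesen eine 10
--                 quater=0 # Schleifenabbruch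
--             if(c==(len-i)): # An der gewuenschten Stelle angelangt
--                 lese=1 # Beginnen mit Lesen
--         if((rest==3) and (lese>0)): # Wenn beim Lesen eine codierte 1 kommt
--             ergebins=(ergebins+cpow2) # Bit Setzen
--         if((lese>0) and (rest != 2)):
--             cpow2=(cpow2+cpow2) # Naechste Zweierpotenz
--         l=quater # Fuer naechsten Durchlauf
--     return ergebins
-- ===== SOURCE B (Python) =====
-- def ListGetElement(l, i):
--     # Build the base-4 digit list (least significant first), then decode in passes.
--     if l <= 0:
--         return 0
--     digits = []
--     while l > 0:
--         digits.append(l % 4)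
--         l //= 4
--     twos = sum(1 for d in digits if d == 2)  # = A's "len"
--     target = twos - i
--     if target < 1 or target > twos:
--         return 0
--     # group = digits after the target-th separator digit 2
--     c = 0
--     group = None
--     for idx, d in enumerate(digits):
--         if d == 2:
--             c += 1
--             if c == target:
--                 group = digits[idx + 1:]
--                 break
--     if group is None:
--         return 0
--     # decode: each non-separator digit advances the power; digit 3 sets the bit
--     val = 0
--     p = 1
--     for d in group:
--         if d == 2:
--             break
--         if d == 3:
--             val += p
--         p += p
--     return val
-- ===== Notes on version B (the rewrite author's own statement) =====
-- stated objective: faster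
-- what changed: B materialises the base-4 digit list once with % and // (replacing A's unary-style linear divtwo halving loop) and decodes in separate passes: count separators, locate the target group, then read its bits; A interleaves everything in one flag-driven loop.
import Mathlib
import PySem

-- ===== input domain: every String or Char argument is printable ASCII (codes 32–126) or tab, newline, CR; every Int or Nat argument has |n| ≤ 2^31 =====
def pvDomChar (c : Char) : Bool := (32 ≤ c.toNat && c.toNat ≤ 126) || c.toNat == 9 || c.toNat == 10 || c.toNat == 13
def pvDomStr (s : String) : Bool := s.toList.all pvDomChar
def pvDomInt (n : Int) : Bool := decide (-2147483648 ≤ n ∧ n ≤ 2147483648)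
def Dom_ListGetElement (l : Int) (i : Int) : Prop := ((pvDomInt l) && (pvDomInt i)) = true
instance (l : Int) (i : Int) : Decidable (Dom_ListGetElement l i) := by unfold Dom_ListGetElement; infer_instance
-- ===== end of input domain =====

-- B decodes the base-4 digit list built once with % and // in separate passes, replacing A's
-- single flag-driven loop over A's linear-time divtwo halving loop (objective: faster).

-- ===== PORT A =====
-- divtwo: y=0; d=2; while d<=x: y+=1; d=(y+y)+2.  The variable d always equals (y+y)+2
-- at the loop test, so the loop is carried on y with the guard written as (y+y)+2 <= x.
def divtwoLoop (x y : Int) : Int :=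
  if (y + y) + 2 ≤ x then divtwoLoop x (y + 1) else y
termination_by (x - (y + y)).toNat
decreasing_by omega

def divtwo (x : Int) : Int := divtwoLoop x 0

-- needed by the termination proofs of the loops below (cited in decreasing_by)
theorem divtwoLoop_eq (x y : Int) (hy : 0 ≤ y) (hx : y + y ≤ x) : divtwoLoop x y = x / 2 := by
  rw [divtwoLoop]
  split_ifs with h
  · exact divtwoLoop_eq x (y + 1) (by omega) (by omega)
  · omega
termination_by (x - (y + y)).toNat
decreasing_by omega

theorem divtwo_eq (x : Int) (hx : 0 ≤ x) : divtwo x = x / 2 :=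
  divtwoLoop_eq x 0 le_rfl (by omega)

def aLenLoop (l c : Int) : Int :=
  if h : 0 < l then
    let quater := divtwo (divtwo l)
    let rest := l - ((quater + quater) + (quater + quater))
    aLenLoop quater (if rest = 2 then c + 1 else c)
  else c
termination_by l.toNat
decreasing_by
  have h1 : divtwo l = l / 2 := divtwo_eq l (by omega)
  have h2 : divtwo (l / 2) = l / 2 / 2 := divtwo_eq (l / 2) (by omega)
  simp only [h1, h2]; omega

def ListGetLength (l : Int) : Int := aLenLoop l (-1)

def aLoop (len i l c lese erg cpow : Int) : Int :=
  if h : 0 < l then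
    let half := divtwo l
    let quater := divtwo half
    let rest := l - ((quater + quater) + (quater + quater))
    let c' := if rest = 2 then c + 1 else c
    let quater' := if rest = 2 ∧ lese > 0 then 0 else quater
    let lese' := if rest = 2 ∧ c' = len - i then 1 else lese
    let erg' := if rest = 3 ∧ lese' > 0 then erg + cpow else erg
    let cpow' := if lese' > 0 ∧ rest ≠ 2 then cpow + cpow else cpow
    aLoop len i quater' c' lese' erg' cpow'
  else erg
termination_by l.toNat
decreasing_by
  have h1 : divtwo l = l / 2 := divtwo_eq l (by omega)
  have h2 : divtwo (l / 2) = l / 2 / 2 := divtwo_eq (l / 2) (by omega)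
  simp only [h1, h2]
  split_ifs <;> omega

def ListGetElement (l : Int) (i : Int) : Int :=
  aLoop (ListGetLength l + 1) i l 0 0 0 1

-- ===== PORT B =====
-- base-4 digits of l, least significant first ('%' and '//' with the positive divisor 4
-- coincide with Lean's emod/ediv, so these are Python-exact here)
def digitsAux (l : Int) : List Int :=
  if h : 0 < l then (l % 4) :: digitsAux (l / 4) else []
termination_by l.toNat
decreasing_by omega

-- the loop locating the target-th separator 2, returning the digits after it
def findGroup (ds : List Int) (c target : Int) : Option (List Int) :=
  match ds with
  | [] => none
  | d :: t =>
    if d = 2 then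
      if c + 1 = target then some t else findGroup t (c + 1) target
    else findGroup t c target

-- decode one group: stop at a separator, digit 3 sets the current power bit
def readGroup (ds : List Int) (p val : Int) : Int :=
  match ds with
  | [] => val
  | d :: t => if d = 2 then val else readGroup t (p + p) (if d = 3 then val + p else val)

def ListGetElement_alt (l : Int) (i : Int) : Int :=
  if l ≤ 0 then 0
  else
    let ds := digitsAux l
    let twos : Int := ds.countP (· == 2)
    let target := twos - i
    if target < 1 ∨ twos < target then 0
    else
      match findGroup ds 0 target with
      | some g => readGroup g 1 0
      | none => 0

-- ===== PRECONDITION & SPEC =====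
def Spec_ListGetElement (l : Int) (i : Int) (out : Int) : Prop := out = ListGetElement_alt l i
instance (l : Int) (i : Int) (out : Int) : Decidable (Spec_ListGetElement l i out) := by unfold Spec_ListGetElement; infer_instance

-- ===== CLAIM (what is proved, stated in full; the proofs are below) =====
def Claim_equal_ListGetElement : Prop := ∀ (l : Int) (i : Int), Dom_ListGetElement l i → Spec_ListGetElement l i (ListGetElement l i)

-- ===== LEMMAS AND PROOFS =====

theorem aLenLoop_eq (l c : Int) : aLenLoop l c = c + ((digitsAux l).countP (· == 2) : Int) := by
  rw [aLenLoop, digitsAux]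
  split_ifs with hpos
  · have h1 : divtwo l = l / 2 := divtwo_eq l (by omega)
    have h2 : divtwo (l / 2) = l / 2 / 2 := divtwo_eq (l / 2) (by omega)
    have h4 : l / 2 / 2 = l / 4 := by omega
    have hrest : l - (l / 4 + l / 4 + (l / 4 + l / 4)) = l % 4 := by omega
    simp only [h1, h2, h4, hrest, aLenLoop_eq (l / 4), List.countP_cons]
    by_cases h2' : l % 4 = 2 <;> simp [h2'] <;> omega
  · simp
termination_by l.toNat
decreasing_by omega

theorem aLoop_read (len i l c erg cpow : Int) :
    aLoop len i l c 1 erg cpow = readGroup (digitsAux l) cpow erg := by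
  rw [aLoop, digitsAux]
  split_ifs with h
  · have h1 : divtwo l = l / 2 := divtwo_eq l (by omega)
    have h2 : divtwo (l / 2) = l / 2 / 2 := divtwo_eq (l / 2) (by omega)
    have h4 : l / 2 / 2 = l / 4 := by omega
    have hrest : l - (l / 4 + l / 4 + (l / 4 + l / 4)) = l % 4 := by omega
    simp only [h1, h2, h4, hrest]
    by_cases h2' : l % 4 = 2
    · -- separator while reading: quater' = 0, the loop exits with erg unchanged
      simp only [readGroup, h2']
      norm_num
      rw [aLoop]
      norm_num
    · simp only [readGroup, h2']
      norm_num
      rw [if_neg h2', aLoop_read len i (l / 4)]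
  · simp [readGroup]
termination_by l.toNat
decreasing_by all_goals omega

theorem aLoop_find (len i l c erg cpow : Int) :
    aLoop len i l c 0 erg cpow =
      match findGroup (digitsAux l) c (len - i) with
      | some g => readGroup g cpow erg
      | none => erg := by
  rw [aLoop, digitsAux]
  split_ifs with h
  · have h1 : divtwo l = l / 2 := divtwo_eq l (by omega)
    have h2 : divtwo (l / 2) = l / 2 / 2 := divtwo_eq (l / 2) (by omega)
    have h4 : l / 2 / 2 = l / 4 := by omega
    have hrest : l - (l / 4 + l / 4 + (l / 4 + l / 4)) = l % 4 := by omega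
    simp only [h1, h2, h4, hrest]
    by_cases h2' : l % 4 = 2
    · by_cases hc : c + 1 = len - i
      · simp only [findGroup, h2', hc]
        norm_num
        rw [aLoop_read len i (l / 4)]
      · simp only [findGroup, h2', hc]
        norm_num
        rw [if_neg hc, aLoop_find len i (l / 4)]
    · simp only [findGroup, h2']
      norm_num
      rw [aLoop_find len i (l / 4)]
  · simp [findGroup]
termination_by l.toNat
decreasing_by all_goals omega

theorem findGroup_none (ds : List Int) (c target : Int)
    (h : target ≤ c ∨ (c + (ds.countP (· == 2) : Int)) < target) :
    findGroup ds c target = none := by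
  induction ds generalizing c with
  | nil => rfl
  | cons d t ih =>
    simp only [findGroup, List.countP_cons] at *
    by_cases hd : d = 2
    · have hcnt : (0 : Int) ≤ (t.countP (· == 2) : Int) := by positivity
      by_cases hc : c + 1 = target
      · simp only [hd, if_pos hc]
        simp [hd] at h; omega
      · simp only [hd, if_neg hc]
        apply ih
        simp [hd] at h
        omega
    · simp only [if_neg hd]
      apply ih
      simp [hd] at h
      omega

-- ===== VERDICT (by name: the statement is the Claim_ definition above) =====
theorem ListGetElement_spec : Claim_equal_ListGetElement := by
  intro l i _
  unfold Spec_ListGetElement ListGetElement ListGetElement_alt ListGetLength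
  by_cases hl : l ≤ 0
  · rw [aLoop]
    simp [hl, show ¬ 0 < l by omega]
  · have hlen : aLenLoop l (-1) + 1 = ((digitsAux l).countP (· == 2) : Int) := by
      rw [aLenLoop_eq]; ring
    rw [aLoop_find, hlen]
    simp only [if_neg hl]
    set cnt : Int := ((digitsAux l).countP (· == 2) : Int) with hcnt
    by_cases hrange : cnt - i < 1 ∨ cnt < cnt - i
    · rw [if_pos hrange]
      rw [findGroup_none]
      · omega
    · rw [if_neg hrange]
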